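-- pv_equiv track=rewrite | github.com/amirhosseinsorour/Linear-Algebra-Projects | Bases_and_Vector_Spaces.py | leftmost_nonzero_column
-- ===== SOURCE A (Python) =====
-- def leftmost_nonzero_column(matrix):
--     isZero = True
--     for j in range(len(matrix[0])):
--         for i in range(len(matrix)):
--             if matrix[i][j] != 0:
--                 isZero = False
--                 break
--         if not isZero:
--             return j
--     return -1
-- ===== SOURCE B (Python) =====
-- def leftmost_nonzero_column(matrix):
--     ncols = len(matrix[0])
--     best = ncols
--     for row in matrix:
--         for j, x in enumerate(row):
--             if x != 0:
--                 if j < best: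
--                     best = j
--                 break
--     return best if best < ncols else -1
-- ===== Notes on version B (the rewrite author's own statement) =====
-- stated objective: alternative
-- what changed: Replaced A's column-major scan with early return by a single row-major pass that takes each row's leftmost-nonzero index (breaking at the first nonzero per row) and keeps the global minimum in an accumulator, returning -1 via an ncols sentinel.
import Mathlib
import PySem

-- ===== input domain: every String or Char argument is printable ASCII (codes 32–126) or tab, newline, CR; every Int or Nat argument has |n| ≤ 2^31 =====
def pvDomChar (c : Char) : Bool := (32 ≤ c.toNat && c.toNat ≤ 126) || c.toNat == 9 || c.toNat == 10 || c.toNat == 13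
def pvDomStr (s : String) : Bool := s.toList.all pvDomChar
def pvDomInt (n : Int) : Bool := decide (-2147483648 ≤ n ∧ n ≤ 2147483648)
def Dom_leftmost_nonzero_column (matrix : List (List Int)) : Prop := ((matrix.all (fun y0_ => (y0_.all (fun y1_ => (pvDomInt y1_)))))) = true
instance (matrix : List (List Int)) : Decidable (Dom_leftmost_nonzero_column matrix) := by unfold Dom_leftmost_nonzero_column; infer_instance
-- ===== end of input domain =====

-- B replaces A's column-major early-exit scan by a row-major pass keeping the minimum
-- leftmost-nonzero index per row (objective: alternative decomposition, same cost class).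

-- ===== PORT A =====
-- inner loop 'for i in range(len(matrix))' with break on the first nonzero entry of column j;
-- row.getD j 0 is exact Python indexing here because Pre_ makes the matrix rectangular and j < ncols
def pvInnerA : List (List Int) → Nat → Bool → Bool
  | [], _, isZero => isZero
  | row :: rest, j, isZero => if row.getD j 0 ≠ 0 then false else pvInnerA rest j isZero

-- outer loop 'for j in range(len(matrix[0]))' with 'if not isZero: return j'
def pvOuterA : List Nat → List (List Int) → Int
  | [], _ => -1
  | j :: js, m => if pvInnerA m j true = false then (j : Int) else pvOuterA js m

def leftmost_nonzero_column (matrix : List (List Int)) : Int :=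
  pvOuterA (List.range (matrix.headD []).length) matrix

-- ===== PORT B =====
-- 'for j, x in enumerate(row): if x != 0: if j < best: best = j; break'
def pvFirstNZ : List Int → Nat → Option Nat
  | [], _ => none
  | x :: xs, j => if x ≠ 0 then some j else pvFirstNZ xs (j + 1)

-- 'for row in matrix' with the running minimum best
def pvBLoop : List (List Int) → Nat → Nat
  | [], best => best
  | row :: rest, best =>
      pvBLoop rest (match pvFirstNZ row 0 with
                    | some j => if j < best then j else best
                    | none => best)

def leftmost_nonzero_column_alt (matrix : List (List Int)) : Int :=
  let ncols := (matrix.headD []).length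
  let best := pvBLoop matrix ncols
  if best < ncols then (best : Int) else -1

-- ===== PRECONDITION & SPEC =====
-- scan-safety: every column A's scan reaches (all earlier columns fully in range and all zero)
-- is itself safe to scan: either in range for every row, or a nonzero entry is hit (with all
-- rows up to it in range) before any too-short row
def pvScanSafe (m : List (List Int)) : Prop :=
  ∀ j < (m.headD []).length,
    (∀ j' < j, ∀ row ∈ m, j' < row.length ∧ row.getD j' 0 = 0) →
    ((∀ row ∈ m, j < row.length) ∨
      ∃ i < m.length, (m.getD i []).getD j 0 ≠ 0 ∧ ∀ i' ≤ i, j < (m.getD i' []).length)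

-- Pre_ is exactly the inputs on which Python A returns: a nonempty matrix (A indexes matrix[0])
-- whose column scan never hits a too-short row before finding a nonzero entry
def Pre_leftmost_nonzero_column (matrix : List (List Int)) : Prop :=
  matrix ≠ [] ∧ pvScanSafe matrix
instance (matrix : List (List Int)) : Decidable (Pre_leftmost_nonzero_column matrix) := by
  unfold Pre_leftmost_nonzero_column pvScanSafe; infer_instance

def pvWitness_leftmost_nonzero_column : List (List Int) := [[0, 1], [0, 2]]

def Spec_leftmost_nonzero_column (matrix : List (List Int)) (out : Int) : Prop := out = leftmost_nonzero_column_alt matrix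
instance (matrix : List (List Int)) (out : Int) : Decidable (Spec_leftmost_nonzero_column matrix out) := by unfold Spec_leftmost_nonzero_column; infer_instance

-- ===== CLAIM (what is proved, stated in full; the proofs are below) =====
def Claim_equal_leftmost_nonzero_column : Prop := ∀ (matrix : List (List Int)), Dom_leftmost_nonzero_column matrix → Pre_leftmost_nonzero_column matrix → Spec_leftmost_nonzero_column matrix (leftmost_nonzero_column matrix)

-- ===== LEMMAS AND PROOFS =====

lemma innerA_false_iff (m : List (List Int)) (j : Nat) :
    pvInnerA m j true = false ↔ ∃ row ∈ m, row.getD j 0 ≠ 0 := by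
  induction m with
  | nil => simp [pvInnerA]
  | cons r rest ih =>
      simp only [pvInnerA]
      by_cases h : r.getD j 0 ≠ 0
      · rw [if_pos h]
        exact ⟨fun _ => ⟨r, by simp, h⟩, fun _ => rfl⟩
      · rw [if_neg h, ih]
        constructor
        · rintro ⟨row, hm, hnz⟩; exact ⟨row, List.mem_cons_of_mem _ hm, hnz⟩
        · rintro ⟨row, hm, hnz⟩
          rcases List.mem_cons.mp hm with rfl | hm'
          · exact absurd hnz h
          · exact ⟨row, hm', hnz⟩

lemma outerA_find (js : List Nat) (m : List (List Int)) :
    pvOuterA js m = (match js.find? (fun j => !(pvInnerA m j true)) with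
                     | some j => (j : Int) | none => -1) := by
  induction js with
  | nil => simp [pvOuterA]
  | cons j js ih =>
      cases h : pvInnerA m j true <;>
        simp [pvOuterA, List.find?_cons, h, ih]

lemma find_range_min {p : Nat → Bool} {n j : Nat}
    (h : (List.range n).find? p = some j) : ∀ i < j, p i = false := by
  induction n with
  | zero => simp [List.find?] at h
  | succ n ih =>
      rw [List.range_succ, List.find?_append] at h
      cases h' : (List.range n).find? p with
      | some j' =>
          rw [h'] at h
          simp only [Option.some_or, Option.some.injEq] at h
          subst h
          exact ih h'
      | none =>
          rw [h'] at h
          simp only [Option.none_or] at h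
          have hj : j = n := by simpa using List.mem_of_find?_eq_some h
          intro i hi
          have hmem : i ∈ List.range n := List.mem_range.mpr (by omega)
          simpa using List.find?_eq_none.mp h' i hmem

lemma fnz_shift (row : List Int) : ∀ k, pvFirstNZ row k = (pvFirstNZ row 0).map (· + k) := by
  induction row with
  | nil => intro k; simp [pvFirstNZ]
  | cons x xs ih =>
      intro k
      by_cases h : x ≠ 0
      · simp [pvFirstNZ, h]
      · simp only [pvFirstNZ, if_neg h, ih (k + 1), ih 1, Option.map_map]
        cases pvFirstNZ xs 0 with
        | none => rfl
        | some a => simp only [Option.map_some, Option.some.injEq, Function.comp_apply]; omega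

lemma fnz_some_iff (row : List Int) : ∀ j, pvFirstNZ row 0 = some j ↔
    j < row.length ∧ row.getD j 0 ≠ 0 ∧ ∀ i < j, row.getD i 0 = 0 := by
  induction row with
  | nil => intro j; simp [pvFirstNZ]
  | cons x xs ih =>
      intro j
      by_cases h : x ≠ 0
      · simp only [pvFirstNZ, if_pos h]
        constructor
        · rintro h'; cases h'
          refine ⟨by simp, by simpa using h, by omega⟩
        · rintro ⟨-, -, hmin⟩
          rcases Nat.eq_zero_or_pos j with rfl | hj
          · rfl
          · exact absurd (hmin 0 hj) h
      · push_neg at h; subst h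
        have hnot : ¬((0:Int) ≠ 0) := by simp
        simp only [pvFirstNZ, if_neg hnot, fnz_shift xs 1]
        cases j with
        | zero =>
            cases pvFirstNZ xs 0 with
            | none => simp
            | some a => simp
        | succ j' =>
            constructor
            · intro h'
              have hxs : pvFirstNZ xs 0 = some j' := by
                cases hx : pvFirstNZ xs 0 with
                | none => rw [hx] at h'; simp at h'
                | some a =>
                    rw [hx] at h'
                    simp only [Option.map_some] at h'
                    injection h' with h''
                    have ha : a = j' := by omega
                    rw [ha]
              rcases (ih j').mp hxs with ⟨h1, h2, h3⟩
              refine ⟨by simpa using h1, by simpa using h2, ?_⟩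
              intro i hi
              cases i with
              | zero => simp
              | succ i' => simpa using h3 i' (by omega)
            · rintro ⟨h1, h2, h3⟩
              have : pvFirstNZ xs 0 = some j' := by
                apply (ih j').mpr
                refine ⟨by simpa using h1, by simpa using h2, ?_⟩
                intro i hi
                simpa using h3 (i + 1) (by omega)
              simp [this]

lemma fnz_none_all (row : List Int) : ∀ k, pvFirstNZ row k = none → ∀ i, row.getD i 0 = 0 := by
  induction row with
  | nil => intro k _ i; simp
  | cons x xs ih =>
      intro k h i
      by_cases hx : x ≠ 0
      · simp [pvFirstNZ, hx] at h
      · simp only [pvFirstNZ, if_neg hx] at h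
        push_neg at hx
        cases i with
        | zero => simpa using hx
        | succ i' => simpa using ih (k + 1) h i'

lemma bLoop_le (m : List (List Int)) : ∀ best, pvBLoop m best ≤ best := by
  induction m with
  | nil => intro best; simp [pvBLoop]
  | cons r rest ih =>
      intro best
      simp only [pvBLoop]
      cases h : pvFirstNZ r 0 with
      | none => exact ih best
      | some j =>
          by_cases hj : j < best
          · simp only [if_pos hj]; exact le_trans (ih j) (by omega)
          · simp only [if_neg hj]; exact ih best

lemma bLoop_le_fnz (m : List (List Int)) : ∀ best row, row ∈ m → ∀ j,
    pvFirstNZ row 0 = some j → pvBLoop m best ≤ j := by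
  induction m with
  | nil => intro _ _ h; simp at h
  | cons r rest ih =>
      intro best row hmem j hj
      rcases List.mem_cons.mp hmem with rfl | hmem'
      · simp only [pvBLoop, hj]
        by_cases h : j < best
        · simp only [if_pos h]; exact bLoop_le rest j
        · simp only [if_neg h]; exact le_trans (bLoop_le rest best) (by omega)
      · simp only [pvBLoop]; exact ih _ row hmem' j hj

lemma bLoop_reach (m : List (List Int)) : ∀ best,
    pvBLoop m best = best ∨ ∃ row ∈ m, pvFirstNZ row 0 = some (pvBLoop m best) := by
  induction m with
  | nil => intro best; left; rfl
  | cons r rest ih =>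
      intro best
      simp only [pvBLoop]
      cases h : pvFirstNZ r 0 with
      | none =>
          rcases ih best with h' | ⟨row, hm, hf⟩
          · left; exact h'
          · right; exact ⟨row, List.mem_cons_of_mem _ hm, hf⟩
      | some j =>
          by_cases hj : j < best
          · simp only [if_pos hj]
            rcases ih j with h' | ⟨row, hm, hf⟩
            · right; exact ⟨r, List.mem_cons_self .., by rw [h, h']⟩
            · right; exact ⟨row, List.mem_cons_of_mem _ hm, hf⟩
          · simp only [if_neg hj]
            rcases ih best with h' | ⟨row, hm, hf⟩
            · left; exact h'
            · right; exact ⟨row, List.mem_cons_of_mem _ hm, hf⟩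

lemma ports_eq (m : List (List Int)) :
    leftmost_nonzero_column m = leftmost_nonzero_column_alt m := by
  unfold leftmost_nonzero_column leftmost_nonzero_column_alt
  set n := (m.headD []).length with hn
  rw [outerA_find]
  cases hf : (List.range n).find? (fun j => !(pvInnerA m j true)) with
  | none =>
      have hall : ∀ j < n, ∀ row ∈ m, row.getD j 0 = 0 := by
        intro j hj row hrow
        have := List.find?_eq_none.mp hf j (List.mem_range.mpr hj)
        simp at this
        by_contra hc
        exact absurd ((innerA_false_iff m j).mpr ⟨row, hrow, hc⟩) (by simp [this])
      have hb : pvBLoop m n = n := by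
        rcases bLoop_reach m n with h | ⟨row, hm, hfz⟩
        · exact h
        · have hle := bLoop_le m n
          by_contra hne
          have hlt : pvBLoop m n < n := by omega
          rcases (fnz_some_iff row _).mp hfz with ⟨-, h2, -⟩
          exact h2 (hall _ hlt row hm)
      simp [hb]
  | some j =>
      have hpj := List.find?_some hf
      have hjn : j < n := List.mem_range.mp (List.mem_of_find?_eq_some hf)
      have hmin : ∀ i < j, pvInnerA m i true = true := by
        intro i hi
        have := find_range_min hf i hi
        simpa using this
      simp only [Bool.not_eq_true'] at hpj
      rcases (innerA_false_iff m j).mp hpj with ⟨row, hrow, hnz⟩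
      -- row's first nonzero index equals j
      have hfz : pvFirstNZ row 0 = some j := by
        cases hx : pvFirstNZ row 0 with
        | none => exact absurd ((fnz_none_all row 0 hx) j) hnz
        | some k =>
            rcases (fnz_some_iff row k).mp hx with ⟨h1, h2, h3⟩
            have hkj : k ≤ j := by
              by_contra hc
              exact hnz (h3 j (by omega))
            have hklt : ¬ k < j := by
              intro hlt
              have := hmin k hlt
              exact absurd ((innerA_false_iff m k).mpr ⟨row, hrow, h2⟩) (by simp [this])
            have hkj2 : k = j := by omega
            rw [hkj2]
      have hub : pvBLoop m n ≤ j := bLoop_le_fnz m n row hrow j hfz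
      have hlb : pvBLoop m n = j := by
        rcases bLoop_reach m n with h | ⟨row', hm', hfz'⟩
        · omega
        · rcases (fnz_some_iff row' _).mp hfz' with ⟨-, h2, -⟩
          have hblt : ¬ pvBLoop m n < j := by
            intro hlt
            have := hmin _ hlt
            exact absurd ((innerA_false_iff m _).mpr ⟨row', hm', h2⟩) (by simp [this])
          omega
      simp [hlb, hjn]

-- ===== VERDICT (by name: the statement is the Claim_ definition above) =====
theorem leftmost_nonzero_column_spec : Claim_equal_leftmost_nonzero_column := by
  intro m _ _
  unfold Spec_leftmost_nonzero_column
  exact ports_eq m
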